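-- pv_equiv track=rewrite | github.com/leyubook/aria2-webui | server/main.py | parse_md5sum_output
-- ===== SOURCE A (Python) =====
-- def parse_md5sum_output(raw_output: str) -> str | None:
--     for line in raw_output.splitlines():
--         stripped = line.strip()
--         if not stripped:
--             continue
--         parts = stripped.split(maxsplit=1)
--         if parts:
--             return parts[0]
--     return None
-- ===== SOURCE B (Python) =====
-- def parse_md5sum_output(raw_output: str) -> str | None:
--     tokens = raw_output.split()
--     return tokens[0] if tokens else None
-- ===== Notes on version B (the rewrite author's own statement) =====
-- stated objective: simpler
-- what changed: Replaced the per-line loop with strip/early-return branches by a single whole-string split(): since every line break is whitespace, the first token of the first non-empty line is just the first whitespace-delimited token of the whole string.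
import Mathlib
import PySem

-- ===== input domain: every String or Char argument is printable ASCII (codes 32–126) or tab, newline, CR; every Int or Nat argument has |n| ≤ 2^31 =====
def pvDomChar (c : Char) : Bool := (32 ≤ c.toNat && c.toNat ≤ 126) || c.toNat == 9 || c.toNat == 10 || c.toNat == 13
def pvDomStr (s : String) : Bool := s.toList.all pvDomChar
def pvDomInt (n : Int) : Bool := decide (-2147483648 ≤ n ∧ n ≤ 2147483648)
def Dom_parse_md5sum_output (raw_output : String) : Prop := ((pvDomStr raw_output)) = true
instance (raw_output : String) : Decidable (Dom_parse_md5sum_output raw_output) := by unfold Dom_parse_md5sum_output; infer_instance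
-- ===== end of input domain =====

-- B replaces A's per-line loop (splitlines + strip + split(maxsplit=1) + early return) by one
-- whole-string split() returning its first token; objective: simpler.


-- ===== PORT A =====
-- the for-loop over raw_output.splitlines(): strip each line, skip empty ones,
-- return parts[0] of stripped.split(maxsplit=1) as soon as parts is non-empty
def pvGoA : List String → Option String
  | [] => none
  | line :: rest =>
    let stripped := PySem.Str.strip line
    if stripped = "" then pvGoA rest
    else
      match PySem.Str.split₀Max stripped 1 with
      | [] => pvGoA rest
      | p :: _ => some p

def parse_md5sum_output (raw_output : String) : Option String :=
  pvGoA (PySem.Str.splitlines raw_output)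

-- ===== PORT B =====
-- tokens = raw_output.split(); return tokens[0] if tokens else None
def parse_md5sum_output_alt (raw_output : String) : Option String :=
  match PySem.Str.split₀ raw_output with
  | [] => none
  | t :: _ => some t

-- ===== PRECONDITION & SPEC =====
def Spec_parse_md5sum_output (raw_output : String) (out : Option String) : Prop := out = parse_md5sum_output_alt raw_output
instance (raw_output : String) (out : Option String) : Decidable (Spec_parse_md5sum_output raw_output out) := by unfold Spec_parse_md5sum_output; infer_instance

-- ===== CLAIM (what is proved, stated in full; the proofs are below) =====
def Claim_equal_parse_md5sum_output : Prop := ∀ (raw_output : String), Dom_parse_md5sum_output raw_output → Spec_parse_md5sum_output raw_output (parse_md5sum_output raw_output)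

-- ===== LEMMAS AND PROOFS =====

-- first whitespace-delimited token of a character list (the common value of both sides)
def pvTok (cs : List Char) : List Char := cs.takeWhile (fun c => !PySem.Chars.isspace c)

def pvFirstTok (cs : List Char) : Option (List Char) :=
  if cs.dropWhile PySem.Chars.isspace = [] then none
  else some (pvTok (cs.dropWhile PySem.Chars.isspace))

-- the characters splitlines breaks on
def pvIsB (c : Char) : Bool :=
  decide (c.toNat = 10) || decide (c.toNat = 13) || decide (c.toNat = 11) || decide (c.toNat = 12) ||
  decide (c.toNat = 28) || decide (c.toNat = 29) || decide (c.toNat = 30) || decide (c.toNat = 133) ||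
  decide (c.toNat = 8232) || decide (c.toNat = 8233)

lemma pvIsB_isspace {c : Char} (h : pvIsB c = true) : PySem.Chars.isspace c = true := by
  simp [pvIsB] at h
  simp [PySem.Chars.isspace]
  omega

lemma pv_splitlines_eq (cs : List Char) :
    PySem.Chars.splitlines cs = PySem.Chars.splitlines.go pvIsB cs [] [] := rfl

-- A's loop, on char-lists
def pvGoAC : List (List Char) → Option (List Char)
  | [] => none
  | l :: rest =>
    if PySem.Chars.strip l = [] then pvGoAC rest
    else
      match PySem.Chars.split₀Max (PySem.Chars.strip l) 1 with
      | [] => pvGoAC rest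
      | p :: _ => some p

-- one-step computation lemmas for the PySem loops
lemma pv_sl_nil (cur : List Char) (acc : List (List Char)) :
    PySem.Chars.splitlines.go pvIsB [] cur acc =
      if cur.isEmpty then acc.reverse else (cur.reverse :: acc).reverse := by
  simp [PySem.Chars.splitlines.go]

lemma pv_sl_crlf (rest cur : List Char) (acc : List (List Char)) :
    PySem.Chars.splitlines.go pvIsB ('\x0d' :: '\n' :: rest) cur acc =
      PySem.Chars.splitlines.go pvIsB rest [] (cur.reverse :: acc) := by
  simp [PySem.Chars.splitlines.go]

lemma pv_sl_one (c : Char) (cur : List Char) (acc : List (List Char)) :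
    PySem.Chars.splitlines.go pvIsB [c] cur acc =
      if pvIsB c then PySem.Chars.splitlines.go pvIsB [] [] (cur.reverse :: acc)
      else PySem.Chars.splitlines.go pvIsB [] (c :: cur) acc := by
  simp [PySem.Chars.splitlines.go]

lemma pv_sl_cons2 (c c2 : Char) (rest2 cur : List Char) (acc : List (List Char))
    (h : ¬(c = '\x0d' ∧ c2 = '\n')) :
    PySem.Chars.splitlines.go pvIsB (c :: c2 :: rest2) cur acc =
      if pvIsB c then PySem.Chars.splitlines.go pvIsB (c2 :: rest2) [] (cur.reverse :: acc)
      else PySem.Chars.splitlines.go pvIsB (c2 :: rest2) (c :: cur) acc := by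
  rw [PySem.Chars.splitlines.go.eq_def]
  split
  · simp_all
  · simp_all
  · simp_all

lemma pv_sp_nil (cur : List Char) (acc : List (List Char)) :
    PySem.Chars.split₀.go [] cur acc =
      if cur.isEmpty then acc.reverse else (cur.reverse :: acc).reverse := by
  simp [PySem.Chars.split₀.go]

lemma pv_sp_cons (c : Char) (rest cur : List Char) (acc : List (List Char)) :
    PySem.Chars.split₀.go (c :: rest) cur acc =
      if PySem.Chars.isspace c then
        (if cur.isEmpty then PySem.Chars.split₀.go rest [] acc
         else PySem.Chars.split₀.go rest [] (cur.reverse :: acc))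
      else PySem.Chars.split₀.go rest (c :: cur) acc := by
  simp [PySem.Chars.split₀.go]

lemma pv_sm_go_cons (fuel m : ℕ) (l : List Char) (c : Char) (v : List Char) (acc : List (List Char))
    (h : List.dropWhile PySem.Chars.isspace l = c :: v) :
    PySem.Chars.split₀Max.go (fuel + 1) m l acc =
      if m = 0 then acc.reverse ++ [c :: v]
      else PySem.Chars.split₀Max.go fuel (m - 1)
             (List.dropWhile (fun x => !PySem.Chars.isspace x) (c :: v))
             (List.takeWhile (fun x => !PySem.Chars.isspace x) (c :: v) :: acc) := by
  simp [PySem.Chars.split₀Max.go, h]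

lemma pv_sm_go_nil (fuel m : ℕ) (l : List Char) (acc : List (List Char))
    (h : List.dropWhile PySem.Chars.isspace l = []) :
    PySem.Chars.split₀Max.go (fuel + 1) m l acc = acc.reverse := by
  simp [PySem.Chars.split₀Max.go, h]

-- strip is empty iff lstrip is empty (iff the line is all whitespace)
lemma pv_strip_eq_nil_iff (l : List Char) :
    PySem.Chars.strip l = [] ↔ l.dropWhile PySem.Chars.isspace = [] := by
  constructor
  · intro h
    by_contra hne
    obtain ⟨c, v, hcv⟩ : ∃ c v, l.dropWhile PySem.Chars.isspace = c :: v := by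
      cases hx : l.dropWhile PySem.Chars.isspace with
      | nil => exact absurd hx hne
      | cons a b => exact ⟨a, b, rfl⟩
    have hc : PySem.Chars.isspace c = false := by
      have h2 := List.head_dropWhile_not PySem.Chars.isspace (l := l) (by simp [hcv])
      simpa [hcv] using h2
    have h3 : PySem.Chars.rstrip (c :: v) = [] := by
      simpa [PySem.Chars.strip, PySem.Chars.lstrip, hcv] using h
    simp [PySem.Chars.rstrip, List.dropWhile_eq_nil_iff] at h3
    have := h3 c (by simp)
    simp [this] at hc
  · intro h
    simp [PySem.Chars.strip, PySem.Chars.lstrip, h, PySem.Chars.rstrip]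

lemma pv_rstrip_append (u : List Char) :
    PySem.Chars.rstrip u ++ (List.takeWhile PySem.Chars.isspace u.reverse).reverse = u := by
  simp only [PySem.Chars.rstrip]
  rw [← List.reverse_append, List.takeWhile_append_dropWhile, List.reverse_reverse]

lemma pv_tok_w_nil (u : List Char) :
    List.takeWhile (fun c => !PySem.Chars.isspace c)
      ((List.takeWhile PySem.Chars.isspace u.reverse).reverse) = [] := by
  cases heq : (List.takeWhile PySem.Chars.isspace u.reverse).reverse with
  | nil => rfl
  | cons a b =>
    have ha : a ∈ List.takeWhile PySem.Chars.isspace u.reverse := by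
      have : a ∈ (List.takeWhile PySem.Chars.isspace u.reverse).reverse := by rw [heq]; simp
      simpa using this
    have hp := List.mem_takeWhile_imp ha
    simp [hp]

lemma pv_takeWhile_rstrip (u : List Char) : pvTok (PySem.Chars.rstrip u) = pvTok u := by
  conv_rhs => rw [← pv_rstrip_append u]
  simp only [pvTok]
  rw [List.takeWhile_append]
  split_ifs with h
  · have h1 := (List.takeWhile_prefix (p := fun c => !PySem.Chars.isspace c)
      (l := PySem.Chars.rstrip u)).eq_of_length h
    rw [h1, pv_tok_w_nil, List.append_nil]
  · rfl

-- split(maxsplit=1) of a stripped non-empty line starts with its first token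
lemma pv_split0Max_head (l : List Char) (h : PySem.Chars.strip l ≠ []) :
    ∃ t, PySem.Chars.split₀Max (PySem.Chars.strip l) 1 =
      pvTok (l.dropWhile PySem.Chars.isspace) :: t := by
  have hl : l.dropWhile PySem.Chars.isspace ≠ [] := fun hc => h ((pv_strip_eq_nil_iff l).mpr hc)
  obtain ⟨c, v, hcv⟩ : ∃ c v, l.dropWhile PySem.Chars.isspace = c :: v := by
    cases hx : l.dropWhile PySem.Chars.isspace with
    | nil => exact absurd hx hl
    | cons a b => exact ⟨a, b, rfl⟩
  have hc : PySem.Chars.isspace c = false := by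
    have h2 := List.head_dropWhile_not PySem.Chars.isspace (l := l) (by simp [hcv])
    simpa [hcv] using h2
  have hs : PySem.Chars.strip l = PySem.Chars.rstrip (c :: v) := by
    simp [PySem.Chars.strip, PySem.Chars.lstrip, hcv]
  obtain ⟨v', hv'⟩ : ∃ v', PySem.Chars.rstrip (c :: v) = c :: v' := by
    cases heq : PySem.Chars.rstrip (c :: v) with
    | nil => exact absurd (hs.trans heq) h
    | cons a b =>
      have hap := pv_rstrip_append (c :: v)
      rw [heq] at hap
      simp [List.cons_append] at hap
      exact ⟨b, by rw [hap.1]⟩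
  have htok : pvTok (c :: v') = pvTok (c :: v) := by
    have := pv_takeWhile_rstrip (c :: v)
    rw [hv'] at this
    exact this
  have hd1 : List.dropWhile PySem.Chars.isspace (c :: v') = c :: v' := by
    simp [hc]
  have step0 : PySem.Chars.split₀Max (c :: v') 1 =
      PySem.Chars.split₀Max.go (v'.length + 2) 1 (c :: v') [] := by
    simp [PySem.Chars.split₀Max]
  have step1 : PySem.Chars.split₀Max.go (v'.length + 2) 1 (c :: v') [] =
      PySem.Chars.split₀Max.go (v'.length + 1) 0
        (List.dropWhile (fun x => !PySem.Chars.isspace x) (c :: v'))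
        [List.takeWhile (fun x => !PySem.Chars.isspace x) (c :: v')] := by
    rw [show v'.length + 2 = (v'.length + 1) + 1 from rfl,
        pv_sm_go_cons (v'.length + 1) 1 (c :: v') c v' [] hd1]
    simp
  rw [hs, hv', hcv]
  cases h2 : List.dropWhile PySem.Chars.isspace
      (List.dropWhile (fun x => !PySem.Chars.isspace x) (c :: v')) with
  | nil =>
    refine ⟨[], ?_⟩
    rw [step0, step1, pv_sm_go_nil (v'.length) 0 _ _ h2]
    simpa [pvTok] using congrArg (fun x => [x]) htok
  | cons a b =>
    refine ⟨[a :: b], ?_⟩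
    rw [step0, step1, pv_sm_go_cons v'.length 0 _ a b _ h2]
    simpa [pvTok] using congrArg (fun x => [x, a :: b]) htok

lemma pvGoAC_cons (l : List Char) (L : List (List Char)) :
    pvGoAC (l :: L) =
      if l.dropWhile PySem.Chars.isspace = [] then pvGoAC L
      else some (pvTok (l.dropWhile PySem.Chars.isspace)) := by
  simp only [pvGoAC]
  by_cases h : PySem.Chars.strip l = []
  · rw [if_pos h, if_pos ((pv_strip_eq_nil_iff l).mp h)]
  · obtain ⟨t, ht⟩ := pv_split0Max_head l h
    rw [if_neg h, ht, if_neg (fun hc => h ((pv_strip_eq_nil_iff l).mpr hc))]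

lemma pvGoA_eq (ls : List String) :
    pvGoA ls = Option.map String.ofList (pvGoAC (ls.map String.toList)) := by
  induction ls with
  | nil => simp [pvGoA, pvGoAC]
  | cons line rest ih =>
    simp only [pvGoA, List.map_cons, pvGoAC]
    by_cases h : PySem.Str.strip line = ""
    · have hc : PySem.Chars.strip line.toList = [] := by
        rw [← PySem.Str.toList_strip, h]; rfl
      rw [if_pos h, if_pos hc, ih]
    · have hc : PySem.Chars.strip line.toList ≠ [] := fun hnil =>
        h (String.toList_eq_nil_iff.mp ((PySem.Str.toList_strip line).trans hnil))
      rw [if_neg h, if_neg hc]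
      have hm := PySem.Str.split₀Max_map_toList (PySem.Str.strip line) 1
      rw [PySem.Str.toList_strip] at hm
      rw [← hm]
      cases hq : PySem.Str.split₀Max (PySem.Str.strip line) 1 with
      | nil => simpa using ih
      | cons p ps => simp [String.ofList_toList]

-- accumulator lemmas
lemma pv_split0_go_acc (cs : List Char) : ∀ (cur : List Char) (acc : List (List Char)),
    PySem.Chars.split₀.go cs cur acc = acc.reverse ++ PySem.Chars.split₀.go cs cur [] := by
  induction cs with
  | nil => intro cur acc; rw [pv_sp_nil, pv_sp_nil]; split_ifs <;> simp
  | cons c rest ih =>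
    intro cur acc
    rw [pv_sp_cons, pv_sp_cons]
    split_ifs with h1 h2
    · exact ih _ _
    · rw [ih [] (cur.reverse :: acc), ih [] [cur.reverse]]; simp
    · exact ih _ _

lemma pv_sl_acc (n : ℕ) : ∀ (cs cur : List Char) (acc : List (List Char)), cs.length ≤ n →
    PySem.Chars.splitlines.go pvIsB cs cur acc =
      acc.reverse ++ PySem.Chars.splitlines.go pvIsB cs cur [] := by
  induction n with
  | zero =>
    intro cs cur acc hn
    rcases cs with _ | ⟨c, rest⟩
    · rw [pv_sl_nil, pv_sl_nil]; split_ifs <;> simp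
    · simp at hn
  | succ n ih =>
    intro cs cur acc hn
    rcases cs with _ | ⟨c, rest⟩
    · rw [pv_sl_nil, pv_sl_nil]; split_ifs <;> simp
    · rcases rest with _ | ⟨c2, rest2⟩
      · rw [pv_sl_one, pv_sl_one]
        split_ifs with hb
        · rw [ih [] [] (cur.reverse :: acc) (by simp), ih [] [] [cur.reverse] (by simp)]; simp
        · exact ih [] (c :: cur) acc (by simp)
      · by_cases hcr : c = '\x0d' ∧ c2 = '\n'
        · obtain ⟨h1, h2⟩ := hcr; subst h1; subst h2
          rw [pv_sl_crlf, pv_sl_crlf]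
          rw [ih rest2 [] (cur.reverse :: acc) (by simp at hn; omega),
              ih rest2 [] [cur.reverse] (by simp at hn; omega)]
          simp
        · rw [pv_sl_cons2 _ _ _ _ _ hcr, pv_sl_cons2 _ _ _ _ _ hcr]
          split_ifs with hb
          · rw [ih (c2 :: rest2) [] (cur.reverse :: acc) (by simp at hn ⊢; omega),
                ih (c2 :: rest2) [] [cur.reverse] (by simp at hn ⊢; omega)]
            simp
          · exact ih (c2 :: rest2) (c :: cur) acc (by simp at hn ⊢; omega)

-- B's side: head of split() is the first token
lemma pv_split0_go_head_ne (cs : List Char) : ∀ (cur : List Char), cur ≠ [] →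
    ∃ t, PySem.Chars.split₀.go cs cur [] = (cur.reverse ++ pvTok cs) :: t := by
  induction cs with
  | nil =>
    intro cur h
    refine ⟨[], ?_⟩
    rw [pv_sp_nil, if_neg (by simpa using h)]
    simp [pvTok]
  | cons c rest ih =>
    intro cur h
    by_cases h1 : PySem.Chars.isspace c = true
    · refine ⟨PySem.Chars.split₀.go rest [] [], ?_⟩
      rw [pv_sp_cons, if_pos h1, if_neg (by simpa using h), pv_split0_go_acc]
      simp [pvTok, h1]
    · obtain ⟨t, ht⟩ := ih (c :: cur) (by simp)
      refine ⟨t, ?_⟩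
      rw [pv_sp_cons, if_neg h1, ht]
      simp [pvTok, h1]

lemma pv_split0_head (cs : List Char) :
    (PySem.Chars.split₀ cs).head? = pvFirstTok cs := by
  induction cs with
  | nil => simp [PySem.Chars.split₀, pv_sp_nil, pvFirstTok]
  | cons c rest ih =>
    simp only [PySem.Chars.split₀] at ih ⊢
    rw [pv_sp_cons]
    by_cases h1 : PySem.Chars.isspace c = true
    · rw [if_pos h1, if_pos (by simp), ih]
      simp [pvFirstTok, h1]
    · rw [if_neg h1]
      obtain ⟨t, ht⟩ := pv_split0_go_head_ne rest [c] (by simp)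
      rw [ht]
      simp [pvFirstTok, h1, pvTok]

-- pvFirstTok bookkeeping
lemma pv_ft_cons_space (c : Char) (cs : List Char) (hc : PySem.Chars.isspace c = true) :
    pvFirstTok (c :: cs) = pvFirstTok cs := by
  simp [pvFirstTok, hc]

lemma pv_ft_append (u v : List Char) (c : Char) (hc : PySem.Chars.isspace c = true) :
    pvFirstTok (u ++ c :: v) =
      if u.dropWhile PySem.Chars.isspace = [] then pvFirstTok v
      else some (pvTok (u.dropWhile PySem.Chars.isspace)) := by
  by_cases h : u.dropWhile PySem.Chars.isspace = []
  · rw [if_pos h]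
    have hd : (u ++ c :: v).dropWhile PySem.Chars.isspace = v.dropWhile PySem.Chars.isspace := by
      rw [List.dropWhile_append]
      simp [h, hc]
    simp [pvFirstTok, hd]
  · rw [if_neg h]
    have hd : (u ++ c :: v).dropWhile PySem.Chars.isspace =
        u.dropWhile PySem.Chars.isspace ++ c :: v := by
      rw [List.dropWhile_append]
      simp [h]
    have hne : u.dropWhile PySem.Chars.isspace ++ c :: v ≠ [] := by simp
    simp only [pvFirstTok, hd, if_neg hne]
    congr 1
    simp only [pvTok]
    rw [List.takeWhile_append]
    split_ifs with hlen
    · have h1 := (List.takeWhile_prefix (p := fun x => !PySem.Chars.isspace x)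
        (l := u.dropWhile PySem.Chars.isspace)).eq_of_length hlen
      simp [hc, h1]
    · rfl

lemma pv_main_nil (cur : List Char) :
    pvGoAC (PySem.Chars.splitlines.go pvIsB [] cur []) = pvFirstTok cur.reverse := by
  rw [pv_sl_nil]
  by_cases h : cur.isEmpty
  · rw [if_pos h]
    have hcur : cur = [] := by simpa using h
    simp [hcur, pvGoAC, pvFirstTok]
  · rw [if_neg h]
    rw [show ((cur.reverse :: ([] : List (List Char))).reverse) = [cur.reverse] from by simp]
    rw [pvGoAC_cons]
    split_ifs with h2 <;> simp [pvGoAC, pvFirstTok, pvTok, h2]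

lemma pv_main (n : ℕ) : ∀ (cs cur : List Char), cs.length ≤ n →
    pvGoAC (PySem.Chars.splitlines.go pvIsB cs cur []) = pvFirstTok (cur.reverse ++ cs) := by
  induction n with
  | zero =>
    intro cs cur hn
    rcases cs with _ | ⟨c, rest⟩
    · rw [List.append_nil]; exact pv_main_nil cur
    · simp at hn
  | succ n ih =>
    intro cs cur hn
    rcases cs with _ | ⟨c, rest⟩
    · rw [List.append_nil]; exact pv_main_nil cur
    · rcases rest with _ | ⟨c2, rest2⟩
      · rw [pv_sl_one]
        by_cases hb : pvIsB c = true
        · rw [if_pos hb]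
          rw [pv_sl_acc 0 [] [] [cur.reverse] (by simp)]
          rw [show (([cur.reverse] : List (List Char)).reverse ++
              PySem.Chars.splitlines.go pvIsB [] [] []) =
              cur.reverse :: PySem.Chars.splitlines.go pvIsB [] [] [] from by
            rw [pv_sl_nil]; simp]
          rw [pvGoAC_cons, pv_ft_append cur.reverse [] c (pvIsB_isspace hb)]
          split_ifs with h2
          · rw [show PySem.Chars.splitlines.go pvIsB [] [] [] = [] from by rw [pv_sl_nil]; simp]
            simp [pvGoAC, pvFirstTok]
          · rfl
        · rw [if_neg hb]
          exact (pv_main_nil (c :: cur)).trans (by simp)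
      · by_cases hcr : c = '\x0d' ∧ c2 = '\n'
        · obtain ⟨h1, h2⟩ := hcr; subst h1; subst h2
          rw [pv_sl_crlf]
          rw [pv_sl_acc n rest2 [] [cur.reverse] (by simp at hn ⊢; omega)]
          rw [show (([cur.reverse] : List (List Char)).reverse ++
              PySem.Chars.splitlines.go pvIsB rest2 [] []) =
              cur.reverse :: PySem.Chars.splitlines.go pvIsB rest2 [] [] from by simp]
          rw [pvGoAC_cons, pv_ft_append cur.reverse ('\n' :: rest2) '\x0d' (by decide),
              pv_ft_cons_space '\n' rest2 (by decide)]
          split_ifs with h2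
          · exact (ih rest2 [] (by simp at hn ⊢; omega)).trans (by simp)
          · rfl
        · rw [pv_sl_cons2 _ _ _ _ _ hcr]
          by_cases hb : pvIsB c = true
          · rw [if_pos hb]
            rw [pv_sl_acc n (c2 :: rest2) [] [cur.reverse] (by simp at hn ⊢; omega)]
            rw [show (([cur.reverse] : List (List Char)).reverse ++
                PySem.Chars.splitlines.go pvIsB (c2 :: rest2) [] []) =
                cur.reverse :: PySem.Chars.splitlines.go pvIsB (c2 :: rest2) [] [] from by simp]
            rw [pvGoAC_cons, pv_ft_append cur.reverse (c2 :: rest2) c (pvIsB_isspace hb)]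
            split_ifs with h2
            · exact (ih (c2 :: rest2) [] (by simp at hn ⊢; omega)).trans (by simp)
            · rfl
          · rw [if_neg hb]
            exact (ih (c2 :: rest2) (c :: cur) (by simp at hn ⊢; omega)).trans (by simp)

-- ===== VERDICT (by name: the statement is the Claim_ definition above) =====
theorem parse_md5sum_output_spec : Claim_equal_parse_md5sum_output := by
  intro raw _
  unfold Spec_parse_md5sum_output
  have ha : parse_md5sum_output raw = Option.map String.ofList (pvFirstTok raw.toList) := by
    unfold parse_md5sum_output
    rw [pvGoA_eq, PySem.Str.splitlines_map_toList, pv_splitlines_eq]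
    rw [show PySem.Chars.splitlines.go pvIsB raw.toList [] [] =
        PySem.Chars.splitlines.go pvIsB raw.toList [] [] from rfl]
    rw [pv_main raw.toList.length raw.toList [] le_rfl]
    simp
  have hb : parse_md5sum_output_alt raw = Option.map String.ofList (pvFirstTok raw.toList) := by
    unfold parse_md5sum_output_alt
    have hh : (PySem.Str.split₀ raw).head?.map String.toList = pvFirstTok raw.toList := by
      rw [← pv_split0_head, ← PySem.Str.split₀_map_toList, List.head?_map]
    cases hs : PySem.Str.split₀ raw with
    | nil => rw [hs] at hh; simp at hh; simp [← hh]
    | cons t ts =>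
      rw [hs] at hh; simp at hh
      rw [← hh]; simp [String.ofList_toList]
  rw [ha, hb]
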